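-- pv_equiv track=rewrite | github.com/QQtangCrypt/RX-Differential-ARX | CHAM/RXcham64s.py | CountCluseRoundFunction
-- ===== SOURCE A (Python) =====
-- HalfBlockSize = 16
--
-- def CountCluseRoundFunction(Round, clausesum):
--     count = clausesum
--     # nonzero input
--     count = count + 1
--     for r in range(0, Round):
--         for i in range(0,HalfBlockSize):
--             count=count+2
--         for i in range(0, HalfBlockSize):
--             count = count + 4
--         for i in range(0, HalfBlockSize - 2):
--             count = count + 8
--         #count = count + 4
--         for i in range(0, HalfBlockSize - 2):
--             count = count + 5
--         for i in range(0, 1):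
--             count = count + 11
--         for i in range(0, HalfBlockSize):
--             count = count + 6
--         if r<16:
--             for i in range(0, HalfBlockSize):
--                 count = count + 8
--         else:
--             for i in range(0, HalfBlockSize):
--                 count = count + 2
--     return count
-- ===== SOURCE B (Python) =====
-- def CountCluseRoundFunction(Round, clausesum):
--     # closed form: each round adds 513 while r < 16, then 417 per round
--     r = Round if Round > 0 else 0
--     low = r if r < 16 else 16
--     return clausesum + 1 + 513 * low + 417 * (r - low)
-- ===== Notes on version B (the rewrite author's own statement) =====
-- stated objective: faster
-- what changed: Replaces the nested constant-increment loops over Round rounds by a closed-form expression: 513 per round for the first min(Round,16) rounds and 417 per round after, plus clausesum+1.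
import Mathlib
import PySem

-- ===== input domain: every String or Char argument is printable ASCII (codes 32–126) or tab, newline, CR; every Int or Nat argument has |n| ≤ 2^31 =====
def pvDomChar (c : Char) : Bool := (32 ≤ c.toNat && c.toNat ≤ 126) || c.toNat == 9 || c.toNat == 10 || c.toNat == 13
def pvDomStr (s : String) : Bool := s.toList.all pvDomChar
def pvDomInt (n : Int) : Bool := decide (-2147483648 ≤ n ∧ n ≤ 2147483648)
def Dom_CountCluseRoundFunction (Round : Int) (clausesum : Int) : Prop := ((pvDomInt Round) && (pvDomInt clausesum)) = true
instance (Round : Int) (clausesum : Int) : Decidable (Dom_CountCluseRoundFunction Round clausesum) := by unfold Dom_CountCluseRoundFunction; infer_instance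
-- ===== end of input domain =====

-- B replaces A's O(Round) nested constant-increment loops by an O(1) closed form.


-- ===== PORT A =====
def HalfBlockSize : Int := 16

-- the body of A's outer `for r in range(0, Round)` loop (each inner Python loop is a fold)
def chamRoundBody (count : Int) (r : Int) : Int :=
  let count := (PySem.List.pyRange 0 HalfBlockSize 1).foldl (fun c _ => c + 2) count
  let count := (PySem.List.pyRange 0 HalfBlockSize 1).foldl (fun c _ => c + 4) count
  let count := (PySem.List.pyRange 0 (HalfBlockSize - 2) 1).foldl (fun c _ => c + 8) count
  let count := (PySem.List.pyRange 0 (HalfBlockSize - 2) 1).foldl (fun c _ => c + 5) count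
  let count := (PySem.List.pyRange 0 1 1).foldl (fun c _ => c + 11) count
  let count := (PySem.List.pyRange 0 HalfBlockSize 1).foldl (fun c _ => c + 6) count
  if r < 16 then
    (PySem.List.pyRange 0 HalfBlockSize 1).foldl (fun c _ => c + 8) count
  else
    (PySem.List.pyRange 0 HalfBlockSize 1).foldl (fun c _ => c + 2) count

def CountCluseRoundFunction (Round : Int) (clausesum : Int) : Int :=
  let count := clausesum
  let count := count + 1
  (PySem.List.pyRange 0 Round 1).foldl chamRoundBody count

-- ===== PORT B =====
def CountCluseRoundFunction_alt (Round : Int) (clausesum : Int) : Int :=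
  let r := if Round > 0 then Round else 0
  let low := if r < 16 then r else 16
  clausesum + 1 + 513 * low + 417 * (r - low)

-- ===== PRECONDITION & SPEC =====
def Spec_CountCluseRoundFunction (Round : Int) (clausesum : Int) (out : Int) : Prop := out = CountCluseRoundFunction_alt Round clausesum
instance (Round : Int) (clausesum : Int) (out : Int) : Decidable (Spec_CountCluseRoundFunction Round clausesum out) := by unfold Spec_CountCluseRoundFunction; infer_instance

-- ===== CLAIM (what is proved, stated in full; the proofs are below) =====
def Claim_equal_CountCluseRoundFunction : Prop := ∀ (Round : Int) (clausesum : Int), Dom_CountCluseRoundFunction Round clausesum → Spec_CountCluseRoundFunction Round clausesum (CountCluseRoundFunction Round clausesum)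

-- ===== LEMMAS AND PROOFS =====

-- each round adds 513 when r < 16, else 417
theorem chamRoundBody_eq (count r : Int) :
    chamRoundBody count r = count + (if r < 16 then 513 else 417) := by
  have h16 : PySem.List.pyRange 0 HalfBlockSize 1 =
      [0,1,2,3,4,5,6,7,8,9,10,11,12,13,14,15] := by decide
  have h14 : PySem.List.pyRange 0 (HalfBlockSize - 2) 1 =
      [0,1,2,3,4,5,6,7,8,9,10,11,12,13] := by decide
  have h1 : PySem.List.pyRange 0 1 1 = [0] := by decide
  simp only [chamRoundBody, h16, h14, h1, List.foldl]
  split <;> ring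

theorem foldl_cham (n : Nat) : ∀ count : Int,
    (PySem.List.pyRange 0 (n : Int) 1).foldl chamRoundBody count
      = count + 513 * min (n : Int) 16 + 417 * ((n : Int) - min (n : Int) 16) := by
  induction n with
  | zero => intro c; simp [PySem.List.pyRange_one_eq_nil]
  | succ m ih =>
    intro c
    have : ((m + 1 : Nat) : Int) = (m : Int) + 1 := by push_cast; ring
    rw [this, PySem.List.pyRange_one_succ_right (by positivity)]
    rw [List.foldl_append]
    simp only [List.foldl, ih, chamRoundBody_eq]
    split <;> omega

-- ===== VERDICT (by name: the statement is the Claim_ definition above) =====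
theorem CountCluseRoundFunction_spec : Claim_equal_CountCluseRoundFunction := by
  intro Round clausesum _
  show CountCluseRoundFunction Round clausesum = CountCluseRoundFunction_alt Round clausesum
  unfold CountCluseRoundFunction CountCluseRoundFunction_alt
  by_cases h : Round ≤ 0
  · rw [PySem.List.pyRange_one_eq_nil h]
    simp only [List.foldl]
    have : ¬ Round > 0 := by omega
    simp [this]
  · have hR : Round = (Round.toNat : Int) := by omega
    rw [hR, foldl_cham]
    have : ((Round.toNat : Int)) > 0 := by omega
    simp only [this, if_pos]
    split <;> omega
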